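-- pv_equiv track=rewrite | github.com/jfsawyer88/ProjectEuler | pe725/python/pe725.py | overcounting_factor
-- ===== SOURCE A (Python) =====
-- def factorial(n):
--     ## returns the factorial of n in factorized form
--     ## represented as a dictionary of primes -> exponents
--     ans = {}
--     for p in primes_below(n+1):
--         ans[p] = factorial_multiplicity(n, p)
--     return ans
--
-- def factorial_multiplicity(n, p):
--     ## return number of time p divides n! (n factorial)
--     e = 0
--     pp = p
--     while n//pp > 0:
--         e += n//pp
--         pp *= p
--     return e
--
-- def primes_below(N):
--     ## returns list of primes < N
--     is_prime = [True] * N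
--     is_prime[0] = False
--     is_prime[1] = False
--     p = 2
--     while p*p < N:
--         if is_prime[p]:
--             for n in range(2*p, N, p):
--                 is_prime[n] = False
--         p+=1
--     primes = []
--     for p in range(N):
--         if is_prime[p]:
--             primes.append(p)
--     return primes
--
-- def overcounting_factor(vp):
--     ## returns the overcounting factor of valid partition vp
--     map = {}
--     for d in vp:
--         if d in map:
--             map[d] += 1
--         else:
--             map[d] = 1
--     ans = {}
--     for d in map:
--         ans = multiply(ans, factorial(map[d]))
--     return ans
--
-- def multiply(a, b):
--     ## multiply numbers a by b
--     ## a and b are fully factorized, represented as dictionaries of primes -> exponents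
--     res = dict(a)
--     for p in b:
--         if p in a:
--             res[p] += b[p]
--         else:
--             res[p] = b[p]
--     return res
-- ===== SOURCE B (Python) =====
-- def is_prime(q):
--     ## trial-division primality test
--     if q < 2:
--         return False
--     d = 2
--     while d * d <= q:
--         if q % d == 0:
--             return False
--         d += 1
--     return True
--
-- def legendre(n, p):
--     ## exponent of prime p in n!  (recursive Legendre: n//p + legendre(n//p, p))
--     if n < p:
--         return 0
--     return n // p + legendre(n // p, p)
--
-- def overcounting_factor(vp):
--     ## product of the factorials of the multiplicities of vp, factorized:
--     ## count multiplicities, then give each trial-division prime up to the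
--     ## maximal multiplicity its total Legendre exponent in one pass.
--     counts = {}
--     for d in vp:
--         counts[d] = counts.get(d, 0) + 1
--     ms = list(counts.values())
--     if not ms:
--         return {}
--     M = max(ms)
--     return {p: sum(legendre(m, p) for m in ms)
--             for p in range(2, M + 1) if is_prime(p)}
-- ===== Notes on version B (the rewrite author's own statement) =====
-- stated objective: simpler
-- what changed: A builds a sieve-based factorization dict per distinct element and merges them with repeated dict-multiply passes; B counts multiplicities once and emits each trial-division-tested prime up to the maximal multiplicity with its exponent computed directly as a sum of recursive Legendre counts, with no sieve and no dict merging.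
import Mathlib
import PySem

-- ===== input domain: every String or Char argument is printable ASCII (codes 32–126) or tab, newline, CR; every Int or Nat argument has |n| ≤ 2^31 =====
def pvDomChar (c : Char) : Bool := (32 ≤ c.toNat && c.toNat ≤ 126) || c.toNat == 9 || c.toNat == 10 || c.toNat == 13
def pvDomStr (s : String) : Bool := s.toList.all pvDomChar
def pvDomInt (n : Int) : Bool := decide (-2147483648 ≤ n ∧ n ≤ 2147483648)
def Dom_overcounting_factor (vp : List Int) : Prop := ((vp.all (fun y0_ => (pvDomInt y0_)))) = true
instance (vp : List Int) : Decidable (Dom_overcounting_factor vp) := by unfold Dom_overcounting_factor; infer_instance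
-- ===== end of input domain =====

-- B replaces A's per-element sieve-and-factorial dict merging by one pass over
-- trial-division-tested primes up to the maximal multiplicity, each given its
-- exponent as a sum of recursive Legendre counts (objective: simpler).

-- ===== PORT A =====

-- 'for n in range(2*p, N, p): is_prime[n] = False'; fuel-bounded loop (fuel = N suffices for p ≥ 1);
-- List.set is exact for the in-range assignments Python performs
def pvMarkLoop : Nat → List Bool → Nat → Nat → Nat → List Bool
  | 0, arr, _, _, _ => arr
  | fuel+1, arr, N, p, n =>
    if n < N then pvMarkLoop fuel (arr.set n false) N p (n + p) else arr

-- 'while p*p < N: if is_prime[p]: mark multiples; p += 1'; fuel-bounded while (fuel = N suffices)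
def pvSieveLoop : Nat → List Bool → Nat → Nat → List Bool
  | 0, arr, _, _ => arr
  | fuel+1, arr, N, p =>
    if p * p < N then
      pvSieveLoop fuel (if (arr.getD p false) = true then pvMarkLoop N arr N p (2 * p) else arr) N (p + 1)
    else arr

-- primes_below(N); every index Python reads/writes is in range for the size-N list, so
-- List.set / List.getD are exact (Python raises for N < 2 at is_prime[1], unreachable here)
def primesBelow (N : Nat) : List Nat :=
  let arr := ((List.replicate N true).set 0 false).set 1 false
  let arr := pvSieveLoop N arr N 2
  (List.range N).filter (fun p => arr.getD p false)

-- 'while n//pp > 0: e += n//pp; pp *= p'; fuel-bounded while (fuel = n suffices for p ≥ 2);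
-- all quantities are nonnegative, so Nat division is Python's //
def pvFacMultAux : Nat → Nat → Nat → Nat → Nat → Nat
  | 0, _, _, _, e => e
  | fuel+1, n, p, pp, e => if 0 < n / pp then pvFacMultAux fuel n p (pp * p) (e + n / pp) else e

def factorialMultiplicity (n p : Nat) : Nat := pvFacMultAux n n p p 0

-- factorial(n): ans = {}; for p in primes_below(n+1): ans[p] = factorial_multiplicity(n, p)
def factorialF (n : Nat) : PySem.Dict Int Int :=
  (primesBelow (n + 1)).foldl
    (fun ans p => ans.insert (Int.ofNat p) (Int.ofNat (factorialMultiplicity n p))) PySem.Dict.empty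

-- multiply(a, b): res = dict(a); for p in b: if p in a: res[p] += b[p] else: res[p] = b[p]
def multiplyF (a b : PySem.Dict Int Int) : PySem.Dict Int Int :=
  b.items.foldl
    (fun res pv =>
      if a.contains pv.1 then res.insert pv.1 (res.getD pv.1 0 + pv.2)
      else res.insert pv.1 pv.2) a

def overcounting_factor (vp : List Int) : List (Int × Int) :=
  let map := vp.foldl
    (fun m d => if m.contains d then m.insert d (m.getD d 0 + 1) else m.insert d 1)
    (PySem.Dict.empty : PySem.Dict Int Int)
  -- counter values are ≥ 1, so .toNat is exact
  let ans := map.keys.foldl (fun ans d => multiplyF ans (factorialF (map.getD d 0).toNat))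
    (PySem.Dict.empty : PySem.Dict Int Int)
  ans.items

-- ===== PORT B =====

-- is_prime(q): trial division, 'd = 2; while d*d <= q: if q % d == 0: return False; d += 1'
-- fuel-bounded while (fuel = q suffices since d stops once d*d > q)
def pvIsPrimeLoop : Nat → Nat → Nat → Bool
  | 0, _, _ => true
  | fuel+1, q, d =>
    if d * d ≤ q then (if q % d == 0 then false else pvIsPrimeLoop fuel q (d + 1)) else true

def isPrimeB (q : Nat) : Bool := if q < 2 then false else pvIsPrimeLoop q q 2

-- legendre(n, p): 'if n < p: return 0; return n//p + legendre(n//p, p)'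
-- the extra 'p < 2' disjunct is a totality guard only: B calls legendre with primes p ≥ 2
def legendreB (n p : Nat) : Nat :=
  if h : n < p ∨ p < 2 then 0
  else n / p + legendreB (n / p) p
termination_by n
decreasing_by exact Nat.div_lt_self (by omega) (by omega)

def overcounting_factor_alt (vp : List Int) : List (Int × Int) :=
  let counts := vp.foldl (fun d x => d.insert x (d.getD x 0 + 1)) (PySem.Dict.empty : PySem.Dict Int Int)
  let ms := counts.values
  -- 'if not ms: return {}' / 'M = max(ms)'
  match PySem.List.max? ms (fun x => x) with
  | none => []
  | some M =>
    -- multiplicities are ≥ 1, so .toNat is exact and range(2, M+1) has M-1 elements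
    ((List.range' 2 (M.toNat - 1)).filter isPrimeB).map
      (fun p => (Int.ofNat p, (ms.map (fun m => Int.ofNat (legendreB m.toNat p))).sum))

-- ===== PRECONDITION & SPEC =====
def Spec_overcounting_factor (vp : List Int) (out : List (Int × Int)) : Prop := out = overcounting_factor_alt vp
instance (vp : List Int) (out : List (Int × Int)) : Decidable (Spec_overcounting_factor vp out) := by unfold Spec_overcounting_factor; infer_instance

-- ===== CLAIM (what is proved, stated in full; the proofs are below) =====
def Claim_equal_overcounting_factor : Prop := ∀ (vp : List Int), Dom_overcounting_factor vp → Spec_overcounting_factor vp (overcounting_factor vp)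

-- ===== LEMMAS AND PROOFS =====

lemma markLoop_length (fuel : Nat) : ∀ (arr : List Bool) (N p n : Nat),
    (pvMarkLoop fuel arr N p n).length = arr.length := by
  induction fuel with
  | zero => intro arr N p n; rfl
  | succ fuel ih =>
    intro arr N p n
    simp only [pvMarkLoop]
    split
    · rw [ih]; simp
    · rfl

lemma markLoop_getD (N p : Nat) (hp : 1 ≤ p) (fuel : Nat) :
    ∀ (arr : List Bool) (n : Nat), arr.length = N → N ≤ n + fuel * p →
    ∀ i, (pvMarkLoop fuel arr N p n).getD i false
      = (arr.getD i false && !decide (n ≤ i ∧ i < N ∧ p ∣ (i - n))) := by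
  induction fuel with
  | zero =>
    intro arr n hsz hf i
    have hcond : ¬ (n ≤ i ∧ i < N ∧ p ∣ (i - n)) := by omega
    simp [pvMarkLoop, hcond]
  | succ fuel ih =>
    intro arr n hsz hf i
    simp only [pvMarkLoop]
    split
    · next hnN =>
      have hr : (fuel + 1) * p = fuel * p + p := by ring
      rw [ih (arr.set n false) (n + p) (by simp [hsz]) (by omega) i]
      by_cases hi : i = n
      · subst hi
        have hset : (arr.set i false).getD i false = false := by
          rw [List.getD_eq_getElem?_getD, List.getElem?_set_self (by omega)]
          rfl
        have hdec : decide (i ≤ i ∧ i < N ∧ p ∣ (i - i)) = true :=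
          decide_eq_true ⟨le_refl _, hnN, by simp⟩
        rw [hset, hdec]
        simp
      · have hset : (arr.set n false).getD i false = arr.getD i false := by
          rw [List.getD_eq_getElem?_getD, List.getElem?_set_ne (fun h => hi h.symm),
            ← List.getD_eq_getElem?_getD]
        rw [hset]
        congr 2
        rw [decide_eq_decide]
        constructor
        · rintro ⟨h1, h2, k, hk⟩
          have hmul : p * (k + 1) = p * k + p := by ring
          exact ⟨by omega, h2, ⟨k + 1, by omega⟩⟩
        · rintro ⟨h1, h2, k, hk⟩
          obtain ⟨j, rfl⟩ : ∃ j, k = j + 1 := by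
            refine ⟨k - 1, ?_⟩
            rcases Nat.eq_zero_or_pos k with h0 | h0
            · subst h0; simp at hk; omega
            · omega
          have hmul : p * (j + 1) = p * j + p := by ring
          exact ⟨by omega, h2, ⟨j, by omega⟩⟩
    · next hnN =>
      have hcond : ¬ (n ≤ i ∧ i < N ∧ p ∣ (i - n)) := by omega
      simp [hcond]

-- the sieve invariant: cell i survives iff no already-processed prime strikes it out
def SieveGood (N p i : Nat) : Prop :=
  2 ≤ i ∧ i < N ∧ ∀ q < p, Nat.Prime q → q * q < N → q ∣ i → q = i

lemma sieveGood_final (N p i : Nat) (hp : 2 ≤ p) (hNp : N ≤ p * p) :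
    SieveGood N p i ↔ (i < N ∧ Nat.Prime i) := by
  constructor
  · rintro ⟨h2, hN, hq⟩
    refine ⟨hN, ?_⟩
    by_contra hnp
    have hmf : i.minFac.Prime := Nat.minFac_prime (by omega)
    have hdvd : i.minFac ∣ i := Nat.minFac_dvd i
    have hsq : i.minFac * i.minFac ≤ i := by
      have := Nat.minFac_sq_le_self (by omega : 0 < i) hnp
      simpa [pow_two] using this
    have hmfp : i.minFac < p := by nlinarith [hmf.two_le]
    have := hq i.minFac hmfp hmf (by omega) hdvd
    have : i.Prime := this ▸ hmf
    exact hnp this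
  · rintro ⟨hN, hpr⟩
    refine ⟨hpr.two_le, hN, ?_⟩
    intro q hqp hq _ hdvd
    rcases hpr.eq_one_or_self_of_dvd q hdvd with h | h
    · exact absurd h hq.ne_one
    · exact h

lemma sieveGood_self (N p : Nat) (hp : 2 ≤ p) (hpN : p < N) : SieveGood N p p ↔ Nat.Prime p := by
  constructor
  · rintro ⟨-, -, hq⟩
    by_contra h
    have hmf : p.minFac.Prime := Nat.minFac_prime (by omega)
    have hdvd : p.minFac ∣ p := Nat.minFac_dvd p
    have hsq : p.minFac * p.minFac ≤ p := by
      have := Nat.minFac_sq_le_self (by omega : 0 < p) h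
      simpa [pow_two] using this
    have hlt : p.minFac < p := by nlinarith [hmf.two_le]
    have heq := hq p.minFac hlt hmf (by omega) hdvd
    exact absurd heq (Nat.ne_of_lt hlt)
  · intro hpr
    refine ⟨hp, hpN, ?_⟩
    intro q hqlt hq _ hdvd
    rcases hpr.eq_one_or_self_of_dvd q hdvd with h | h
    · exact absurd h hq.ne_one
    · exact h

lemma sieveGood_succ_prime (N p i : Nat) (hp : 2 ≤ p) (hpr : Nat.Prime p) (hpN : p * p < N) :
    SieveGood N (p+1) i ↔ (SieveGood N p i ∧ ¬(2*p ≤ i ∧ i < N ∧ p ∣ (i - 2*p))) := by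
  constructor
  · rintro ⟨h2, hN, hq⟩
    refine ⟨⟨h2, hN, fun q hql => hq q (by omega)⟩, ?_⟩
    rintro ⟨hm1, hm2, k, hk⟩
    have hmul : p * (k + 2) = p * k + 2 * p := by ring
    have hdvd : p ∣ i := ⟨k + 2, by omega⟩
    have hpi := hq p (by omega) hpr hpN hdvd
    omega
  · rintro ⟨⟨h2, hN, hq⟩, hnm⟩
    refine ⟨h2, hN, ?_⟩
    intro q hql hqp hqN hdvd
    rcases Nat.lt_succ_iff_lt_or_eq.mp hql with h' | h'
    · exact hq q h' hqp hqN hdvd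
    · subst h'
      by_contra hne
      obtain ⟨k, hk⟩ := hdvd
      obtain ⟨j, rfl⟩ : ∃ j, k = j + 2 := by
        refine ⟨k - 2, ?_⟩
        rcases k with _ | k
        · simp at hk; omega
        · rcases k with _ | k
          · simp at hk; omega
          · omega
      have hmul : q * (j + 2) = q * j + 2 * q := by ring
      exact hnm ⟨by omega, hN, ⟨j, by omega⟩⟩

lemma sieveGood_succ_notprime (N p i : Nat) (h : ¬ Nat.Prime p) :
    SieveGood N (p+1) i ↔ SieveGood N p i := by
  unfold SieveGood
  constructor <;> rintro ⟨h2, hN, hq⟩ <;> refine ⟨h2, hN, ?_⟩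
  · intro q hql hqp hqN; exact hq q (by omega) hqp hqN
  · intro q hql hqp hqN hdvd
    rcases Nat.lt_succ_iff_lt_or_eq.mp hql with h' | h'
    · exact hq q h' hqp hqN hdvd
    · subst h'; exact absurd hqp h

lemma sieveLoop_getD (N : Nat) (fuel : Nat) :
    ∀ (p : Nat) (arr : List Bool), 2 ≤ p → arr.length = N →
    (∀ i, (arr.getD i false = true ↔ SieveGood N p i)) →
    N ≤ (p + fuel) * (p + fuel) →
    ∀ i, ((pvSieveLoop fuel arr N p).getD i false = true ↔ (i < N ∧ Nat.Prime i)) := by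
  induction fuel with
  | zero =>
    intro p arr hp hsz hinv hb i
    simpa [pvSieveLoop] using (hinv i).trans (sieveGood_final N p i hp (by simpa using hb))
  | succ fuel ih =>
    intro p arr hp hsz hinv hb i
    simp only [pvSieveLoop]
    split
    · next hlt =>
      have hpN : p < N := by nlinarith
      have hsz' : (if (arr.getD p false) = true then pvMarkLoop N arr N p (2 * p) else arr).length = N := by
        split
        · rw [markLoop_length]; exact hsz
        · exact hsz
      have hinv' : ∀ j, ((if (arr.getD p false) = true then pvMarkLoop N arr N p (2 * p) else arr).getD j false
          = true ↔ SieveGood N (p+1) j) := by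
        intro j
        by_cases hgp : arr.getD p false = true
        · have hpP : Nat.Prime p := (sieveGood_self N p hp hpN).mp ((hinv p).mp hgp)
          rw [if_pos hgp]
          rw [markLoop_getD N p (by omega) N arr (2*p) hsz
            (by nlinarith [Nat.mul_le_mul_left N (show 1 ≤ p by omega)]) j]
          rw [Bool.and_eq_true, hinv j, sieveGood_succ_prime N p j hp hpP hlt]
          apply and_congr Iff.rfl
          rw [Bool.not_eq_true', decide_eq_false_iff_not]
        · have hnP : ¬ Nat.Prime p := fun hpr => hgp ((hinv p).mpr ((sieveGood_self N p hp hpN).mpr hpr))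
          rw [if_neg hgp, hinv j, sieveGood_succ_notprime N p j hnP]
      have hb' : N ≤ (p + 1 + fuel) * (p + 1 + fuel) := by
        have : p + 1 + fuel = p + (fuel + 1) := by omega
        rw [this]; exact hb
      exact ih (p+1) _ (by omega) hsz' hinv' hb' i
    · next hge =>
      exact (hinv i).trans (sieveGood_final N p i hp (by omega))

lemma init_inv (N i : Nat) :
    ((((List.replicate N true).set 0 false).set 1 false).getD i false = true) ↔ SieveGood N 2 i := by
  have hvac : ∀ q < 2, Nat.Prime q → q * q < N → q ∣ i → q = i := by
    intro q hq hqp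
    interval_cases q
    · exact absurd hqp Nat.not_prime_zero
    · exact absurd hqp Nat.not_prime_one
  have hlen : (((List.replicate N true).set 0 false).set 1 false).length = N := by simp
  by_cases hiN : i < N
  · by_cases h1 : i = 1
    · subst h1
      have hv : (((List.replicate N true).set 0 false).set 1 false).getD 1 false = false := by
        rw [List.getD_eq_getElem?_getD, List.getElem?_set_self (by simpa using hiN)]
        rfl
      rw [hv]
      constructor
      · intro h; exact absurd h (by simp)
      · rintro ⟨h2, -, -⟩; exact absurd h2 (by omega)
    · by_cases h0 : i = 0
      · subst h0
        have hv : (((List.replicate N true).set 0 false).set 1 false).getD 0 false = false := by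
          rw [List.getD_eq_getElem?_getD, List.getElem?_set_ne (by omega),
            List.getElem?_set_self (by simpa using hiN)]
          rfl
        rw [hv]
        constructor
        · intro h; exact absurd h (by simp)
        · rintro ⟨h2, -, -⟩; exact absurd h2 (by omega)
      · have hv : (((List.replicate N true).set 0 false).set 1 false).getD i false = true := by
          rw [List.getD_eq_getElem?_getD, List.getElem?_set_ne (fun h => h1 h.symm),
            List.getElem?_set_ne (fun h => h0 h.symm), List.getElem?_replicate, if_pos hiN]
          rfl
        rw [hv]
        constructor
        · intro _; exact ⟨by omega, hiN, hvac⟩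
        · intro _; rfl
  · have hv : (((List.replicate N true).set 0 false).set 1 false).getD i false = false := by
      rw [List.getD_eq_getElem?_getD, List.getElem?_eq_none (by simp; omega)]
      rfl
    rw [hv]
    constructor
    · intro h; exact absurd h (by simp)
    · rintro ⟨-, hN, -⟩; exact absurd hN hiN

lemma primesBelow_eq (N : Nat) :
    primesBelow N = (List.range N).filter (fun i => decide (Nat.Prime i)) := by
  show (List.range N).filter
      (fun p => (pvSieveLoop N (((List.replicate N true).set 0 false).set 1 false) N 2).getD p false) = _
  apply List.filter_congr
  intro p hp
  have hpN : p < N := List.mem_range.mp hp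
  have h := sieveLoop_getD N N 2 (((List.replicate N true).set 0 false).set 1 false)
    (by omega) (by simp) (init_inv N) (by nlinarith) p
  by_cases hpr : Nat.Prime p
  · rw [h.mpr ⟨hpN, hpr⟩]; simp [hpr]
  · have hf : (pvSieveLoop N (((List.replicate N true).set 0 false).set 1 false) N 2).getD p false = false := by
      by_cases hb : (pvSieveLoop N (((List.replicate N true).set 0 false).set 1 false) N 2).getD p false = true
      · exact absurd (h.mp hb).2 hpr
      · simpa using hb
    rw [hf]; simp [hpr]

lemma mem_primesBelow {p N : Nat} : p ∈ primesBelow N ↔ p < N ∧ Nat.Prime p := by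
  simp [primesBelow_eq, List.mem_filter]

lemma nodup_primesBelow (N : Nat) : (primesBelow N).Nodup := by
  rw [primesBelow_eq]; exact (List.nodup_range).filter _

lemma nodup_primesBelowI (N : Nat) : ((primesBelow N).map Int.ofNat).Nodup :=
  (nodup_primesBelow N).map (fun _ _ h => Int.ofNat.inj h)

lemma primes_split (a b : Nat) (h : a ≤ b) :
    primesBelow b = primesBelow a ++ ((List.range (b - a)).map (a + ·)).filter (fun i => decide (Nat.Prime i)) := by
  rw [primesBelow_eq, primesBelow_eq, ← List.filter_append]
  congr 1
  conv_lhs => rw [show b = a + (b - a) by omega]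
  exact List.range_add

lemma facMult_eq_zero {m p : Nat} (h : m < p) : factorialMultiplicity m p = 0 := by
  cases m with
  | zero => rfl
  | succ k =>
    simp only [factorialMultiplicity, pvFacMultAux]
    rw [Nat.div_eq_of_lt h]
    simp

-- B's max over the Int-cast multiplicities is the Nat fold-max
lemma max?_map_ofNat (c : Nat) (l : List Nat) :
    PySem.List.max? ((c :: l).map (fun m => Int.ofNat m)) (fun x => x)
      = some (Int.ofNat ((c :: l).foldl max 0)) := by
  have key : ∀ (t : List Nat) (a : Nat),
      PySem.List.max? ((a :: t).map (fun m => Int.ofNat m)) (fun x => x)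
        = some (Int.ofNat (t.foldl max a)) := by
    intro t
    induction t with
    | nil => intro a; rfl
    | cons b t ih =>
      intro a
      have hab : PySem.List.max? ((a :: b :: t).map (fun m => Int.ofNat m)) (fun x => x)
          = PySem.List.max? (((max a b) :: t).map (fun m => Int.ofNat m)) (fun x => x) := by
        unfold PySem.List.max?
        simp only [List.map_cons, List.foldl_cons]
        congr 1
        show (if (Int.ofNat a) < (Int.ofNat b) then some (Int.ofNat b) else some (Int.ofNat a))
            = some (Int.ofNat (max a b))
        by_cases h : a < b
        · rw [if_pos (show Int.ofNat a < Int.ofNat b by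
              simp only [Int.ofNat_eq_natCast]; exact_mod_cast h), max_eq_right h.le]
        · rw [if_neg (show ¬ Int.ofNat a < Int.ofNat b by
              simp only [Int.ofNat_eq_natCast]; exact_mod_cast h), max_eq_left (not_lt.mp h)]
      rw [hab, ih (max a b)]
      simp [List.foldl_cons]
  rw [key l c]
  simp [Nat.zero_max]

-- find? over the value-tagged prime list
lemma find?_map_primes (g : Nat → Int) (l : List Nat) (p : Nat) :
    (l.map (fun q => (Int.ofNat q, g q))).find? (fun pv => pv.1 == Int.ofNat p)
      = if p ∈ l then some (Int.ofNat p, g p) else none := by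
  induction l with
  | nil => simp
  | cons q l ih =>
    simp only [List.map_cons]
    by_cases h : q = p
    · subst h
      rw [List.find?_cons_of_pos (by simp)]
      simp
    · rw [List.find?_cons_of_neg (by simp [h])]
      rw [ih]
      simp [Ne.symm h]

-- getD after the multiply fold: each key of b is hit once, reading a's old value
lemma merge_getD (aC : Int → Bool) (pvs : List (Int × Int)) :
    ∀ (res : PySem.Dict Int Int) (k : Int), (pvs.map (fun pv => pv.1)).Nodup →
    (pvs.foldl (fun r pv => r.insert pv.1 (if aC pv.1 then r.getD pv.1 0 + pv.2 else pv.2)) res).getD k 0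
      = (match pvs.find? (fun pv => pv.1 == k) with
         | some pv => if aC k then res.getD k 0 + pv.2 else pv.2
         | none => res.getD k 0) := by
  induction pvs with
  | nil => intro res k _; simp
  | cons pv pvs ih =>
    intro res k h
    simp only [List.map_cons, List.nodup_cons] at h
    simp only [List.foldl_cons]
    by_cases hk : pv.1 = k
    · rw [List.find?_cons_of_pos (by simp [hk])]
      rw [ih _ k h.2]
      have hnone : List.find? (fun pv' => pv'.1 == k) pvs = none := by
        rw [List.find?_eq_none]
        intro x hx
        simp only [beq_iff_eq]
        intro hxk
        exact h.1 (hk ▸ hxk ▸ List.mem_map_of_mem hx)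
      rw [hnone]
      show (res.insert pv.1 _).getD k 0 = _
      rw [← hk, PySem.Dict.getD_insert_self]
    · rw [List.find?_cons_of_neg (by simp [hk])]
      rw [ih _ k h.2]
      have hne : (res.insert pv.1 (if aC pv.1 then res.getD pv.1 0 + pv.2 else pv.2)).getD k 0
          = res.getD k 0 := PySem.Dict.getD_insert_of_ne res _ 0 (fun h' => hk h'.symm)
      cases hfind : List.find? (fun pv' => pv'.1 == k) pvs with
      | some pv' =>
        show (if aC k then (res.insert pv.1 (if aC pv.1 then res.getD pv.1 0 + pv.2 else pv.2)).getD k 0 + pv'.2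
              else pv'.2)
            = (if aC k then res.getD k 0 + pv'.2 else pv'.2)
        rw [hne]
      | none =>
        show (res.insert pv.1 (if aC pv.1 then res.getD pv.1 0 + pv.2 else pv.2)).getD k 0 = res.getD k 0
        exact hne

-- canonical shape of the accumulated factorization
def canonItems (cs : List Nat) : List (Int × Int) :=
  (primesBelow (cs.foldl max 0 + 1)).map
    (fun p => (Int.ofNat p, (cs.map (fun m => Int.ofNat (factorialMultiplicity m p))).sum))

lemma factorialF_items (m : Nat) :
    (factorialF m).items
      = (primesBelow (m + 1)).map (fun p => (Int.ofNat p, Int.ofNat (factorialMultiplicity m p))) := by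
  unfold factorialF
  rw [PySem.Dict.items_foldl_insert_fresh (primesBelow (m + 1)) (fun p => Int.ofNat p)
    (fun p => Int.ofNat (factorialMultiplicity m p)) PySem.Dict.empty
    (fun a _ => PySem.Dict.contains_empty _) (nodup_primesBelowI (m + 1))]
  rw [show (PySem.Dict.empty : PySem.Dict Int Int).items = [] from rfl, List.nil_append]

lemma sum_facMult_eq_zero (cs : List Nat) (p : Nat) (h : cs.foldl max 0 < p) :
    (cs.map (fun m => Int.ofNat (factorialMultiplicity m p))).sum = 0 := by
  apply List.sum_eq_zero
  intro x hx
  obtain ⟨m, hm, rfl⟩ := List.mem_map.mp hx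
  have hle : m ≤ cs.foldl max 0 := (PySem.List.le_foldl_max cs 0).2 m hm
  rw [facMult_eq_zero (by omega)]
  rfl

lemma step_lemma (cs : List Nat) (m : Nat) :
    multiplyF (PySem.Dict.mk (canonItems cs)) (factorialF m) = PySem.Dict.mk (canonItems (cs ++ [m])) := by
  set A' := cs.foldl max 0 with hA
  have hT : (cs ++ [m]).foldl max 0 = max A' m := by rw [List.foldl_append]; rfl
  set a := PySem.Dict.mk (canonItems cs) with ha
  have haKeys : a.keys = (primesBelow (A' + 1)).map Int.ofNat := by
    show (canonItems cs).map Prod.fst = _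
    rw [canonItems, List.map_map]
    rfl
  have haNodup : a.keys.Nodup := by rw [haKeys]; exact nodup_primesBelowI _
  have hbItems := factorialF_items m
  have hbKeys : (factorialF m).items.map (fun pv => pv.1) = (primesBelow (m + 1)).map Int.ofNat := by
    rw [hbItems, List.map_map]; rfl
  have hstep : (fun (res : PySem.Dict Int Int) (pv : Int × Int) =>
        if a.contains pv.1 then res.insert pv.1 (res.getD pv.1 0 + pv.2) else res.insert pv.1 pv.2)
      = (fun res pv => res.insert pv.1 (if a.contains pv.1 then res.getD pv.1 0 + pv.2 else pv.2)) := by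
    funext res pv
    by_cases h : a.contains pv.1 <;> simp [h]
  have haMem : ∀ (q : Nat), (Int.ofNat q ∈ a.keys) ↔ (q < A' + 1 ∧ Nat.Prime q) := by
    intro q
    rw [haKeys]
    constructor
    · intro hq
      obtain ⟨q', hq', he⟩ := List.mem_map.mp hq
      have : q' = q := Int.ofNat.inj he
      exact this ▸ mem_primesBelow.mp hq'
    · intro hq
      exact List.mem_map_of_mem (mem_primesBelow.mpr hq)
  apply PySem.Dict.ext
  show (List.foldl _ a (factorialF m).items).items = _
  rw [hstep]
  have hResNodup : (List.foldl (fun (res : PySem.Dict Int Int) pv =>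
      res.insert pv.1 (if a.contains pv.1 then res.getD pv.1 0 + pv.2 else pv.2)) a
      (factorialF m).items).keys.Nodup :=
    PySem.Dict.nodup_keys_foldl_insert_key _ _ _ _ haNodup
  have hKeys0 := PySem.Dict.keys_foldl_insert_key (factorialF m).items (fun pv => pv.1)
    (fun (res : PySem.Dict Int Int) pv => if a.contains pv.1 then res.getD pv.1 0 + pv.2 else pv.2) a
  have hKeys : (List.foldl (fun (res : PySem.Dict Int Int) pv =>
      res.insert pv.1 (if a.contains pv.1 then res.getD pv.1 0 + pv.2 else pv.2)) a
      (factorialF m).items).keys = (primesBelow (max A' m + 1)).map Int.ofNat := by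
    rw [hKeys0, hbKeys, haKeys]
    rw [PySem.Set.update_eq_append_filter]
    rw [PySem.Set.ofList_eq_self_of_nodup _ (nodup_primesBelowI (m + 1))]
    by_cases hle : m ≤ A'
    · rw [max_eq_left hle]
      have hnil : ∀ y ∈ (primesBelow (m + 1)).map Int.ofNat,
          ¬ ((!PySem.Set.contains ((primesBelow (A' + 1)).map Int.ofNat) y) = true) := by
        intro y hy
        obtain ⟨q, hq, rfl⟩ := List.mem_map.mp hy
        have hq' := mem_primesBelow.mp hq
        have hmemA : q ∈ primesBelow (A' + 1) := mem_primesBelow.mpr ⟨by omega, hq'.2⟩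
        simp [hmemA]
      rw [List.filter_eq_nil_iff.mpr hnil, List.append_nil]
    · have hlt : A' < m := by omega
      rw [max_eq_right hlt.le]
      rw [primes_split (A' + 1) (m + 1) (by omega), List.map_append, List.filter_append]
      have h1 : ∀ y ∈ (primesBelow (A' + 1)).map Int.ofNat,
          ¬ ((!PySem.Set.contains ((primesBelow (A' + 1)).map Int.ofNat) y) = true) := by
        intro y hy
        simp [hy]
      rw [List.filter_eq_nil_iff.mpr h1, List.nil_append]
      congr 1
      apply List.filter_eq_self.mpr
      intro y hy
      obtain ⟨q, hq, rfl⟩ := List.mem_map.mp hy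
      have hqge : A' + 1 ≤ q := by
        have := (List.mem_filter.mp hq).1
        obtain ⟨x, _, rfl⟩ := List.mem_map.mp this
        omega
      have hqnotN : q ∉ primesBelow (A' + 1) := by
        intro hc
        have := mem_primesBelow.mp hc
        omega
      simp [hqnotN]
  have hgetD : ∀ p' : Nat, p' ∈ primesBelow (max A' m + 1) →
      (List.foldl (fun (res : PySem.Dict Int Int) pv =>
        res.insert pv.1 (if a.contains pv.1 then res.getD pv.1 0 + pv.2 else pv.2)) a
        (factorialF m).items).getD (Int.ofNat p') 0
      = (cs.map (fun m' => Int.ofNat (factorialMultiplicity m' p'))).sum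
        + Int.ofNat (factorialMultiplicity m p') := by
    intro p' hp'
    obtain ⟨hp'T, hp'pr⟩ := mem_primesBelow.mp hp'
    rw [merge_getD a.contains (factorialF m).items a (Int.ofNat p')
      (by rw [hbKeys]; exact nodup_primesBelowI _)]
    rw [hbItems, find?_map_primes]
    have hContTrue : p' ≤ A' → a.contains (Int.ofNat p') = true := by
      intro hle
      rw [PySem.Dict.contains_eq_decide_mem_keys]
      exact decide_eq_true ((haMem p').mpr ⟨Nat.lt_succ_of_le hle, hp'pr⟩)
    have hContFalse : A' < p' → a.contains (Int.ofNat p') = false := by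
      intro hlt
      rw [PySem.Dict.contains_eq_decide_mem_keys]
      exact decide_eq_false (fun hc => by have := (haMem p').mp hc; omega)
    have hGetA : p' ≤ A' → a.getD (Int.ofNat p') 0
        = (cs.map (fun m' => Int.ofNat (factorialMultiplicity m' p'))).sum := by
      intro hle
      have hmem : (Int.ofNat p', (cs.map (fun m' => Int.ofNat (factorialMultiplicity m' p'))).sum)
          ∈ a.items := by
        show _ ∈ canonItems cs
        unfold canonItems
        exact List.mem_map_of_mem (mem_primesBelow.mpr ⟨by omega, hp'pr⟩)
      exact PySem.Dict.getD_of_mem_items a hmem haNodup 0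
    by_cases hle : p' ≤ A'
    · by_cases hm : p' ∈ primesBelow (m + 1)
      · rw [if_pos hm]
        show (if a.contains (Int.ofNat p') = true
            then a.getD (Int.ofNat p') 0 + Int.ofNat (factorialMultiplicity m p')
            else Int.ofNat (factorialMultiplicity m p')) = _
        rw [hContTrue hle, hGetA hle]
        simp
      · rw [if_neg hm]
        have hmlt : m < p' := by
          by_contra hc
          exact hm (mem_primesBelow.mpr ⟨by omega, hp'pr⟩)
        show a.getD (Int.ofNat p') 0 = _
        rw [hGetA hle, facMult_eq_zero hmlt]
        simp
    · have hgt : A' < p' := by omega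
      have hp'm : p' ∈ primesBelow (m + 1) := by
        apply mem_primesBelow.mpr
        refine ⟨?_, hp'pr⟩
        rcases max_cases A' m with ⟨he, _⟩ | ⟨he, _⟩ <;> omega
      rw [if_pos hp'm]
      show (if a.contains (Int.ofNat p') = true
          then a.getD (Int.ofNat p') 0 + Int.ofNat (factorialMultiplicity m p')
          else Int.ofNat (factorialMultiplicity m p')) = _
      rw [hContFalse hgt, sum_facMult_eq_zero cs p' hgt]
      simp
  rw [PySem.Dict.items_eq_map_keys _ hResNodup 0]
  rw [hKeys, List.map_map]
  unfold canonItems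
  rw [hT]
  apply List.map_congr_left
  intro p' hp'
  simp only [Function.comp_apply]
  rw [hgetD p' hp']
  rw [List.map_append, List.sum_append]
  simp

lemma canonItems_nil : canonItems [] = [] := by rfl

lemma main_lemma (cs : List Nat) :
    (cs.foldl (fun a m => multiplyF a (factorialF m)) PySem.Dict.empty).items = canonItems cs := by
  induction cs using List.reverseRecOn with
  | nil => rw [canonItems_nil]; rfl
  | append_singleton cs m ih =>
    rw [List.foldl_append, List.foldl_cons, List.foldl_nil]
    have hd : (cs.foldl (fun a m => multiplyF a (factorialF m)) PySem.Dict.empty)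
        = PySem.Dict.mk (canonItems cs) := by
      apply PySem.Dict.ext
      simpa using ih
    rw [hd, step_lemma]

-- ===== B-side lemmas: the trial-division test and the recursive Legendre count =====

lemma legendreB_zero (p : Nat) (hp : 1 ≤ p) : legendreB 0 p = 0 := by
  rw [legendreB, dif_pos (Or.inl (show 0 < p by omega))]

lemma legendreB_step (n p : Nat) (hp : 2 ≤ p) :
    legendreB n p = n / p + legendreB (n / p) p := by
  by_cases h : n < p
  · rw [legendreB, dif_pos (Or.inl h), Nat.div_eq_of_lt h, legendreB_zero p (by omega)]
  · rw [legendreB, dif_neg (by omega)]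

lemma facMultAux_eq_legendreB (fuel : Nat) : ∀ (n p pp e : Nat), 2 ≤ p → 1 ≤ pp → n / pp ≤ fuel →
    pvFacMultAux fuel n p pp e = e + (n / pp + legendreB (n / pp) p) := by
  induction fuel with
  | zero =>
    intro n p pp e hp hpp hf
    have h0 : n / pp = 0 := Nat.le_zero.mp hf
    rw [pvFacMultAux, h0, legendreB_zero p (show 1 ≤ p by omega)]
    omega
  | succ fuel ih =>
    intro n p pp e hp hpp hf
    rw [pvFacMultAux]
    by_cases hpos : 0 < n / pp
    · rw [if_pos hpos]
      have hdd : n / (pp * p) = n / pp / p := (Nat.div_div_eq_div_mul n pp p).symm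
      have hlt : n / (pp * p) < n / pp := by
        rw [hdd]; exact Nat.div_lt_self hpos (by omega)
      have hpp' : 1 ≤ pp * p := by
        have := Nat.mul_pos (show 0 < pp by omega) (show 0 < p by omega)
        omega
      rw [ih n p (pp * p) (e + n / pp) hp hpp' (Nat.lt_succ_iff.mp (lt_of_lt_of_le hlt hf))]
      rw [hdd, legendreB_step (n / pp) p hp]
      omega
    · rw [if_neg hpos]
      have h0 : n / pp = 0 := Nat.le_zero.mp (Nat.not_lt.mp hpos)
      rw [h0, legendreB_zero p (show 1 ≤ p by omega)]
      omega

lemma facMult_eq_legendreB (n p : Nat) (hp : 2 ≤ p) :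
    factorialMultiplicity n p = legendreB n p := by
  unfold factorialMultiplicity
  rw [facMultAux_eq_legendreB n n p p 0 hp (show 1 ≤ p by omega) (Nat.div_le_self n p)]
  rw [legendreB_step n p hp]
  omega

lemma isPrimeLoop_spec (fuel : Nat) : ∀ (q d : Nat), 1 ≤ d → q < (d + fuel) * (d + fuel) →
    (pvIsPrimeLoop fuel q d = true ↔ ∀ m, d ≤ m → m * m ≤ q → ¬ m ∣ q) := by
  induction fuel with
  | zero =>
    intro q d hd hb
    simp only [Nat.add_zero] at hb
    simp only [pvIsPrimeLoop, true_iff]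
    intro m hm hmq
    exfalso
    have : d * d ≤ m * m := Nat.mul_le_mul hm hm
    omega
  | succ fuel ih =>
    intro q d hd hb
    rw [pvIsPrimeLoop]
    by_cases hdd : d * d ≤ q
    · rw [if_pos hdd]
      by_cases hmod : q % d = 0
      · have hdvd : d ∣ q := Nat.dvd_iff_mod_eq_zero.mpr hmod
        rw [if_pos (by simp [hmod])]
        exact iff_of_false (by simp) (fun hall => hall d (le_refl d) hdd hdvd)
      · rw [if_neg (by simp [hmod])]
        rw [ih q (d + 1) (by omega) (by have : d + 1 + fuel = d + (fuel + 1) := by omega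
                                        rw [this]; exact hb)]
        constructor
        · intro h m hm hmq
          rcases Nat.lt_or_ge d m with h' | h'
          · exact h m (by omega) hmq
          · have : m = d := by omega
            subst this
            exact fun hdvd => hmod (Nat.dvd_iff_mod_eq_zero.mp hdvd)
        · intro h m hm hmq
          exact h m (by omega) hmq
    · rw [if_neg hdd]
      simp only [true_iff]
      intro m hm hmq
      exfalso
      have : d * d ≤ m * m := Nat.mul_le_mul hm hm
      omega

lemma isPrimeB_eq : isPrimeB = (fun q => decide (Nat.Prime q)) := by
  funext q
  unfold isPrimeB
  by_cases h2 : q < 2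
  · rw [if_pos h2]
    have : ¬ Nat.Prime q := fun hpr => by have := hpr.two_le; omega
    simp [this]
  · rw [if_neg h2]
    have hspec := isPrimeLoop_spec q q 2 (by omega) (by nlinarith)
    by_cases hpr : Nat.Prime q
    · have hnd : ∀ m, 2 ≤ m → m * m ≤ q → ¬ m ∣ q := by
        intro m hm hmq hdvd
        rcases hpr.eq_one_or_self_of_dvd m hdvd with h | h
        · omega
        · subst h; nlinarith
      rw [hspec.mpr hnd]
      simp [hpr]
    · have hnot : ¬ ∀ m, 2 ≤ m → m * m ≤ q → ¬ m ∣ q := by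
        intro hall
        apply hpr
        by_contra hnp
        have hmf : q.minFac.Prime := Nat.minFac_prime (by omega)
        have hsq : q.minFac * q.minFac ≤ q := by
          have := Nat.minFac_sq_le_self (by omega : 0 < q) hnp
          simpa [pow_two] using this
        exact absurd (Nat.minFac_dvd q) (hall q.minFac hmf.two_le hsq)
      have hf : pvIsPrimeLoop q q 2 = false := by
        by_cases hb : pvIsPrimeLoop q q 2 = true
        · exact absurd (hspec.mp hb) hnot
        · simpa using hb
      rw [hf]
      simp [hpr]

lemma filter_isPrimeB_range' (M : Nat) (hM : 1 ≤ M) :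
    (List.range' 2 (M - 1)).filter isPrimeB = primesBelow (M + 1) := by
  rw [primesBelow_eq, isPrimeB_eq]
  have hsplit : List.range (M + 1) = List.range' 0 2 ++ List.range' 2 (M - 1) := by
    rw [List.range'_append_1, List.range_eq_range']
    congr 1
    omega
  rw [hsplit, List.filter_append]
  have h01 : (List.range' 0 2).filter (fun i => decide (Nat.Prime i)) = [] := by
    show [0, 1].filter (fun i => decide (Nat.Prime i)) = []
    simp [Nat.not_prime_zero, Nat.not_prime_one]
  rw [h01, List.nil_append]

-- ===== VERDICT (by name: the statement is the Claim_ definition above) =====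
theorem overcounting_factor_spec : Claim_equal_overcounting_factor := by
  unfold Claim_equal_overcounting_factor
  intro vp _
  unfold Spec_overcounting_factor
  simp only [overcounting_factor, overcounting_factor_alt]
  have hsteps : (fun (m : PySem.Dict Int Int) (d : Int) =>
        if m.contains d then m.insert d (m.getD d 0 + 1) else m.insert d 1)
      = (fun d x => d.insert x (d.getD x 0 + 1)) := by
    funext md x
    by_cases h : md.contains x
    · simp [h]
    · rw [if_neg h, PySem.Dict.getD_of_not_contains md 0 (by simpa using h)]
      norm_num
  rw [hsteps]
  rw [PySem.Dict.foldl_insert_getD_add_one_eq_counter]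
  have hbody : (fun (ans : PySem.Dict Int Int) (d : Int) =>
        multiplyF ans (factorialF ((PySem.Dict.counter vp).getD d 0).toNat))
      = (fun ans d => multiplyF ans (factorialF (List.count d vp))) := by
    funext ans d
    rw [PySem.Dict.getD_counter]
    simp
  rw [hbody]
  rw [PySem.Dict.keys_counter]
  rw [show (PySem.Set.ofList vp).foldl (fun ans d => multiplyF ans (factorialF (List.count d vp)))
        PySem.Dict.empty
      = ((PySem.Set.ofList vp).map (fun d => List.count d vp)).foldl
        (fun a c => multiplyF a (factorialF c)) PySem.Dict.empty from
      (List.foldl_map (f := fun d => List.count d vp)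
        (g := fun a c => multiplyF a (factorialF c))
        (l := PySem.Set.ofList vp) (init := PySem.Dict.empty)).symm]
  rw [main_lemma]
  have hvalues : (PySem.Dict.counter vp).values
      = ((PySem.Set.ofList vp).map (fun d => List.count d vp)).map (fun m => Int.ofNat m) := by
    show (PySem.Dict.counter vp).items.map Prod.snd = _
    rw [PySem.Dict.items_counter, List.map_map, List.map_map]
    rfl
  rw [hvalues]
  cases hset : (PySem.Set.ofList vp).map (fun d => List.count d vp) with
  | nil => rfl
  | cons c l =>
    rw [max?_map_ofNat]
    -- the head multiplicity is the count of an element of vp, hence ≥ 1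
    have hc1 : 1 ≤ c := by
      obtain ⟨d, t, hdt, hcd, -⟩ := List.map_eq_cons_iff.mp hset
      have hdvp : d ∈ vp := by
        have hmem : d ∈ PySem.Set.ofList vp := by rw [hdt]; exact List.mem_cons_self
        simpa [PySem.Set.mem_ofList] using hmem
      have := List.count_pos_iff.mpr hdvp
      omega
    have hM1 : 1 ≤ (c :: l).foldl max 0 := by
      have := (PySem.List.le_foldl_max (c :: l) 0).2 c List.mem_cons_self
      omega
    unfold canonItems
    simp only [Int.ofNat_eq_natCast, Int.toNat_natCast]
    rw [filter_isPrimeB_range' ((c :: l).foldl max 0) hM1]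
    apply List.map_congr_left
    intro p' hp'
    have hp2 : 2 ≤ p' := (mem_primesBelow.mp hp').2.two_le
    congr 1
    rw [List.map_map]
    refine congrArg List.sum (List.map_congr_left ?_)
    intro m' _
    simp only [Function.comp_apply, Int.ofNat_eq_natCast, Int.toNat_natCast]
    rw [facMult_eq_legendreB m' p' hp2]
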